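-- pv_equiv track=rewrite | github.com/CST333/fet2neo_asymmetry | fetal2neonatal_stack_jd_for_randomise.py | get_image_list_string
-- ===== SOURCE A (Python) =====
-- def get_image_list_string(subjects):
--     string=''
--     subject_list=''
--
--     for subj in subjects:
--         string=" ".join([string, 'path'])
--         subject_list+=subj+' 1 \n'
--     for subj in subjects:
--         string=" ".join([string, 'path'])
--         subject_list+=str(subj)+' 0 \n'
--     return string,  subject_list
-- ===== SOURCE B (Python) =====
-- def get_image_list_string(subjects):
--     subs = list(subjects)
--     count = 2 * len(subs)
--     string = '' if count == 0 else ' ' + ' '.join(['path'] * count)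
--     subject_list = ''.join(s + ' 1 \n' for s in subs) + \
--                    ''.join(str(s) + ' 0 \n' for s in subs)
--     return string, subject_list
-- ===== Notes on version B (the rewrite author's own statement) =====
-- stated objective: faster
-- what changed: Replaces the quadratic repeated '" ".join' accumulation with a closed-form build: the first string is a space plus 2*len(subjects) 'path' tokens joined once, and the label block is two joins of comprehensions instead of += concatenation in a loop.
import Mathlib
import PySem

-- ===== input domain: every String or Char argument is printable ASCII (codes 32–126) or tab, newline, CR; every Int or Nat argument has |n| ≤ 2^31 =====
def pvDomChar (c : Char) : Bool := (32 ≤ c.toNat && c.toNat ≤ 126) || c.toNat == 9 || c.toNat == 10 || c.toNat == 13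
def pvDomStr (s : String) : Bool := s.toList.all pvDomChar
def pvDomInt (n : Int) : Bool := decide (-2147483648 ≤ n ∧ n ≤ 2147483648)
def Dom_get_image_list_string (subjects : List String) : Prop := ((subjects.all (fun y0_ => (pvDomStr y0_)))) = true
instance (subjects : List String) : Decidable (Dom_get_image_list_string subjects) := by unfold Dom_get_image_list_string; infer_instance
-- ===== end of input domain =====

-- B builds both strings in closed form (one join over replicated tokens, two joined comprehensions)
-- instead of A's quadratic += / " ".join accumulation loop; return value only, no mutation involved.

-- ===== PORT A =====
-- two loops over subjects, each re-joining the accumulated string with 'path' and appending a label line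
def get_image_list_string (subjects : List String) : String × String :=
  let st1 := subjects.foldl
    (fun acc subj => (PySem.Str.join " " [acc.1, "path"], acc.2 ++ (subj ++ " 1 \n")))
    ("", "")
  subjects.foldl
    (fun acc subj => (PySem.Str.join " " [acc.1, "path"], acc.2 ++ (subj ++ " 0 \n")))
    st1

-- ===== PORT B =====
def get_image_list_string_alt (subjects : List String) : String × String :=
  let count := 2 * subjects.length
  let string := if count = 0 then "" else " " ++ PySem.Str.join " " (List.replicate count "path")
  let subject_list :=
    PySem.Str.join "" (subjects.map (fun s => s ++ " 1 \n")) ++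
    PySem.Str.join "" (subjects.map (fun s => s ++ " 0 \n"))
  (string, subject_list)

-- ===== PRECONDITION & SPEC =====
def Spec_get_image_list_string (subjects : List String) (out : String × String) : Prop := out = get_image_list_string_alt subjects
instance (subjects : List String) (out : String × String) : Decidable (Spec_get_image_list_string subjects out) := by unfold Spec_get_image_list_string; infer_instance

-- ===== CLAIM (what is proved, stated in full; the proofs are below) =====
def Claim_equal_get_image_list_string : Prop := ∀ (subjects : List String), Dom_get_image_list_string subjects → Spec_get_image_list_string subjects (get_image_list_string subjects)

-- ===== LEMMAS AND PROOFS =====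

-- " ".join([x, 'path']) is x ++ " path"
lemma join_pair (x : String) : PySem.Str.join " " [x, "path"] = x ++ " path" := by
  apply String.toList_inj.mp
  simp [PySem.Str.toList_join, PySem.Chars.join_cons_cons, PySem.Chars.join_singleton]

-- ''.join of a cons
lemma join_empty_cons (x : String) (xs : List String) :
    PySem.Str.join "" (x :: xs) = x ++ PySem.Str.join "" xs := by
  cases xs with
  | nil =>
    apply String.toList_inj.mp
    simp [PySem.Str.toList_join, PySem.Chars.join_singleton, PySem.Chars.join_nil]
  | cons y ys =>
    apply String.toList_inj.mp
    simp [PySem.Str.toList_join, PySem.Chars.join_cons_cons]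

-- the invariant of one of A's loops, for either tag
lemma fold_eq (l : List String) (tag a b : String) :
    l.foldl (fun acc subj => (PySem.Str.join " " [acc.1, "path"], acc.2 ++ (subj ++ tag))) (a, b)
    = (a ++ PySem.Str.join "" (List.replicate l.length " path"),
       b ++ PySem.Str.join "" (l.map (fun s => s ++ tag))) := by
  induction l generalizing a b with
  | nil => simp [PySem.Str.join, PySem.Chars.join_nil]
  | cons x xs ih =>
    rw [List.foldl_cons, ih]
    simp only [join_pair, List.length_cons, List.map_cons, List.replicate_succ,
      join_empty_cons, Prod.mk.injEq]
    exact ⟨String.append_assoc .., String.append_assoc ..⟩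

-- the concatenation of n copies of " path" is A's first string for n tokens
lemma rep_path (n : Nat) :
    PySem.Str.join "" (List.replicate n " path")
    = if n = 0 then "" else " " ++ PySem.Str.join " " (List.replicate n "path") := by
  induction n with
  | zero => simp [PySem.Str.join, PySem.Chars.join_nil]
  | succ m ih =>
    cases m with
    | zero =>
      apply String.toList_inj.mp
      simp [PySem.Str.toList_join, PySem.Chars.join_singleton]
    | succ k =>
      rw [List.replicate_succ, join_empty_cons, ih]
      simp only [Nat.succ_ne_zero, if_false]
      apply String.toList_inj.mp
      simp [PySem.Str.toList_join, PySem.Chars.join_cons_cons, List.replicate_succ]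

-- ''.join with empty separator distributes over ++ (Chars level)
lemma join_nil_cons (p : List Char) (rest : List (List Char)) :
    PySem.Chars.join [] (p :: rest) = p ++ PySem.Chars.join [] rest := by
  cases rest with
  | nil => simp [PySem.Chars.join_singleton, PySem.Chars.join_nil]
  | cons q r => simp [PySem.Chars.join_cons_cons]

lemma join_nil_append (l1 l2 : List (List Char)) :
    PySem.Chars.join [] (l1 ++ l2) = PySem.Chars.join [] l1 ++ PySem.Chars.join [] l2 := by
  induction l1 with
  | nil => simp [PySem.Chars.join_nil]
  | cons p r ih => simp [join_nil_cons, ih]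

-- splitting the 2n-token join at n
lemma rep_path_add (n : Nat) :
    PySem.Str.join "" (List.replicate n " path") ++ PySem.Str.join "" (List.replicate n " path")
    = PySem.Str.join "" (List.replicate (2 * n) " path") := by
  apply String.toList_inj.mp
  have h2 : 2 * n = n + n := by omega
  rw [h2, List.replicate_add]
  simp only [String.toList_append, PySem.Str.toList_join, List.map_replicate,
    List.map_append]
  have : ("" : String).toList = [] := rfl
  rw [this, join_nil_append]

-- ===== VERDICT (by name: the statement is the Claim_ definition above) =====
theorem get_image_list_string_spec : Claim_equal_get_image_list_string := by
  intro subjects _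
  show _ = _
  simp only [get_image_list_string, get_image_list_string_alt, fold_eq]
  rw [Prod.ext_iff]
  refine ⟨?_, ?_⟩
  · show ("" ++ _) ++ _ = _
    rw [String.empty_append, rep_path_add, rep_path]
  · show ("" ++ _) ++ _ = _
    rw [String.empty_append]
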